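-- pv_equiv track=rewrite | github.com/WojciechBednarczyk/Scrambling | server.py | scramX16
-- ===== SOURCE A (Python) =====
-- from operator import xor
--
-- def sync_clock(frame, data, bit):
--     if bit[1] != -1:                                     # Sprawdzanie czy używamy obu bitów, potrzebne dla niektórych scramblerów
--         temp = xor(frame[bit[0]-1], frame[bit[1]-1])     # XOR dla bit[0] i bit[1],
--     else:                                                # Jeśli tylko 1 bit, przypisujemy wartość temu bitowi
--         temp = frame[bit[0]-1]
--     frame.pop()                                          # Usuwanie ostatniego bitu z ramki
--     frame.insert(0, temp)                                # Dodanie na początek wartości xor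
--     xor_value = xor(temp, data)                          # Sprzężenie zwrotne wartości syganłu wejściowego i xora z bitów ramki
--     return xor_value                                     # Zwrócenie rezultatu
--
-- def scramX16(bits):
--     dataLength = len(bits)
--     frameX16 = [1, 0, 1, 0, 0, 0, 0, 0, 1, 0, 1, 1, 0, 1, 0, 0, 1]           # Ramka
--     scramBit = [16, -1]                                                      # Bity używane w sprzężeniu zwrotym, dla x16 bit 16, -1 dla braku drugiego bitu
--     output_signal = []                                                       # Tablica na dane wyjściowe
--     for i in range(0, dataLength):
--         clock_result = sync_clock(frameX16, bits[i], scramBit)               # Operacja zegara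
--         output_signal.append(clock_result)                                   # Dodanie wyników do tablicy danych wyjściowych
--     return output_signal
-- ===== SOURCE B (Python) =====
-- from operator import xor
--
-- def scramX16(bits):
--     # The X16 scrambler is additive: the feedback bit frame[15] never depends on
--     # the data, so the XOR mask is the fixed period-16 PN sequence obtained by
--     # reading the first 16 register cells back to front.
--     frameX16 = [1, 0, 1, 0, 0, 0, 0, 0, 1, 0, 1, 1, 0, 1, 0, 0, 1]
--     pn = list(reversed(frameX16[:16]))
--     return [xor(pn[i % 16], b) for i, b in enumerate(bits)]
-- ===== Notes on version B (the rewrite author's own statement) =====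
-- stated objective: simpler
-- what changed: Replaces the stateful shift-register simulation (pop/insert on a 17-cell frame each clock) with a precomputed fixed period-16 PN mask XORed onto the input in one comprehension.
import Mathlib
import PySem

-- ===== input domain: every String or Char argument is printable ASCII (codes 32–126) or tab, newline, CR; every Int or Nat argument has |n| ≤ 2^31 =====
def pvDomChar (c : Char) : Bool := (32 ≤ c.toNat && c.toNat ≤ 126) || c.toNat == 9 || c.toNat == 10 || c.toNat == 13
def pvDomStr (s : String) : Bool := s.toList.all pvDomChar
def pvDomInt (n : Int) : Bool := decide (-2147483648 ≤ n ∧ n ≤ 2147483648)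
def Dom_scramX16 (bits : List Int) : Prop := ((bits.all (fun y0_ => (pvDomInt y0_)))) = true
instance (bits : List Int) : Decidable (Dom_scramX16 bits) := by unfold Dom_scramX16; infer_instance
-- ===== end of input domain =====

-- B replaces A's stateful shift-register simulation by XORing a fixed period-16 PN mask onto the input (simpler).


-- ===== PORT A =====
-- sync_clock: returns (xor_value, mutated frame); the pop? fallback branch is a totality
-- guard only (frame is always the non-empty 17-cell register, so pop? is always some).
def pySyncClock (frame : List Int) (data : Int) (bit : Int × Int) : Int × List Int :=
  let temp : Int :=
    if bit.2 ≠ -1 then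
      PySem.Int.bxor (PySem.List.pyGetD frame (bit.1 - 1) 0) (PySem.List.pyGetD frame (bit.2 - 1) 0)
    else
      PySem.List.pyGetD frame (bit.1 - 1) 0
  let frame :=
    match PySem.List.pop? frame (-1) with
    | some r => r.2
    | none => frame
  let frame := PySem.List.insert frame 0 temp
  (PySem.Int.bxor temp data, frame)

def scramX16 (bits : List Int) : List Int :=
  let dataLength : Int := PySem.List.len bits
  let frameX16 : List Int := [1, 0, 1, 0, 0, 0, 0, 0, 1, 0, 1, 1, 0, 1, 0, 0, 1]
  let scramBit : Int × Int := (16, -1)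
  ((PySem.List.pyRange 0 dataLength 1).foldl
    (fun (st : List Int × List Int) i =>
      ((pySyncClock st.1 (PySem.List.pyGetD bits i 0) scramBit).2,
       st.2 ++ [(pySyncClock st.1 (PySem.List.pyGetD bits i 0) scramBit).1]))
    (frameX16, [])).2

-- ===== PORT B =====
def scramX16_alt (bits : List Int) : List Int :=
  let frameX16 : List Int := [1, 0, 1, 0, 0, 0, 0, 0, 1, 0, 1, 1, 0, 1, 0, 0, 1]
  let pn : List Int := (PySem.List.slice frameX16 none (some 16)).reverse
  (PySem.List.enumerate bits 0).map
    (fun p => PySem.Int.bxor (PySem.List.pyGetD pn (PySem.Int.mod p.1 16) 0) p.2)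

-- ===== PRECONDITION & SPEC =====
def Spec_scramX16 (bits : List Int) (out : List Int) : Prop := out = scramX16_alt bits
instance (bits : List Int) (out : List Int) : Decidable (Spec_scramX16 bits out) := by unfold Spec_scramX16; infer_instance

-- ===== CLAIM (what is proved, stated in full; the proofs are below) =====
def Claim_equal_scramX16 : Prop := ∀ (bits : List Int), Dom_scramX16 bits → Spec_scramX16 bits (scramX16 bits)

-- ===== LEMMAS AND PROOFS =====

-- proof-side abbreviations
def pvFrame0 : List Int := [1, 0, 1, 0, 0, 0, 0, 0, 1, 0, 1, 1, 0, 1, 0, 0, 1]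

def pvNext (f : List Int) : List Int :=
  PySem.List.insert
    (match PySem.List.pop? f (-1) with
     | some r => r.2
     | none => f) 0 (PySem.List.pyGetD f 15 0)

def pvFrameAt (k : Nat) : List Int := pvNext^[k % 16] pvFrame0

def pvPn : List Int := (PySem.List.slice pvFrame0 none (some 16)).reverse

lemma pvSync_eq (f : List Int) (d : Int) :
    pySyncClock f d (16, -1) = (PySem.Int.bxor (PySem.List.pyGetD f 15 0) d, pvNext f) := rfl

set_option maxRecDepth 8192 in
lemma pvFrameAt_succ (k : Nat) : pvFrameAt (k + 1) = pvNext (pvFrameAt k) := by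
  unfold pvFrameAt
  rcases Nat.lt_or_ge (k % 16) 15 with h | h
  · have h1 : (k + 1) % 16 = k % 16 + 1 := by omega
    rw [h1, Function.iterate_succ_apply']
  · have h15 : k % 16 = 15 := by omega
    have h1 : (k + 1) % 16 = 0 := by omega
    rw [h1, h15]
    decide

lemma pvMask_eq (k : Nat) :
    PySem.List.pyGetD (pvFrameAt k) 15 0 = PySem.List.pyGetD pvPn ((k % 16 : Nat) : Int) 0 := by
  have h : ∀ j : Fin 16,
      PySem.List.pyGetD (pvNext^[j.val] pvFrame0) 15 0
        = PySem.List.pyGetD pvPn ((j.val : Nat) : Int) 0 := by decide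
  have := h ⟨k % 16, Nat.mod_lt _ (by norm_num)⟩
  simpa [pvFrameAt] using this

lemma pvLoop_eq (bits : List Int) : ∀ (k : Nat) (out : List Int),
    (bits.foldl
      (fun (st : List Int × List Int) b =>
        ((pySyncClock st.1 b (16, -1)).2, st.2 ++ [(pySyncClock st.1 b (16, -1)).1]))
      (pvFrameAt k, out)).2
    = out ++ (PySem.List.enumerate bits (k : Int)).map
        (fun p => PySem.Int.bxor (PySem.List.pyGetD pvPn (PySem.Int.mod p.1 16) 0) p.2) := by
  induction bits with
  | nil => intro k out; simp [PySem.List.enumerate_nil]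
  | cons b t ih =>
    intro k out
    rw [List.foldl_cons, pvSync_eq]
    have hmod : PySem.Int.mod ((k : Nat) : Int) 16 = ((k % 16 : Nat) : Int) := by
      exact_mod_cast PySem.Int.mod_natCast k 16
    have h1 : (((pvNext (pvFrameAt k), out ++ [PySem.Int.bxor (PySem.List.pyGetD (pvFrameAt k) 15 0) b]) : List Int × List Int))
        = (pvFrameAt (k + 1), out ++ [PySem.Int.bxor (PySem.List.pyGetD pvPn (PySem.Int.mod ((k : Nat) : Int) 16) 0) b]) := by
      rw [pvFrameAt_succ, pvMask_eq, hmod]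
    rw [h1, ih (k + 1)]
    rw [PySem.List.enumerate_cons]
    push_cast
    simp

-- ===== VERDICT (by name: the statement is the Claim_ definition above) =====
theorem scramX16_spec : Claim_equal_scramX16 := by
  intro bits _
  unfold Spec_scramX16
  simp only [scramX16, scramX16_alt, PySem.List.len_eq]
  rw [PySem.List.foldl_pyRange_zero_pyGetD' bits 0
      (fun (st : List Int × List Int) b =>
        ((pySyncClock st.1 b (16, -1)).2, st.2 ++ [(pySyncClock st.1 b (16, -1)).1]))
      (([1, 0, 1, 0, 0, 0, 0, 0, 1, 0, 1, 1, 0, 1, 0, 0, 1] : List Int), ([] : List Int))]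
  have h0 : ([1, 0, 1, 0, 0, 0, 0, 0, 1, 0, 1, 1, 0, 1, 0, 0, 1] : List Int) = pvFrameAt 0 := by
    simp [pvFrameAt, pvFrame0]
  rw [h0]
  simpa [pvPn, pvFrame0] using pvLoop_eq bits 0 []
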